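-- pv_equiv track=rewrite | github.com/denismironchuk/hakerrank-python | kickstart/year2020/rugbyTest.py | countTrivial
-- ===== SOURCE A (Python) =====
-- n = 5
--
-- xLim = (-5, 5)
--
-- yLim = (-5, 5)
--
-- def brutforce(distsAll, row, procColumns):
--     if (row == len(distsAll)):
--         return 0;
--
--     dists = distsAll[row]
--     res = 999999999
--     for c in range(len(dists)):
--         if (c in procColumns):
--             continue
--         procColumns.add(c)
--         res = min(res, brutforce(distsAll, row + 1, procColumns) + dists[c])
--         procColumns.remove(c)
--
--     return res
--
-- def countTrivial(points):
--     res = 99999999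
--     for x in range(xLim[0], xLim[1]):
--         for y in range(yLim[0], yLim[1]):
--             linePoints = []
--             for i in range(n):
--                 linePoints.append((x + i, y))
--
--             distsAll = []
--             for point in points:
--                 distsOne = []
--                 for linePoint in linePoints:
--                     distsOne.append(abs(point[0] - linePoint[0]) + abs(point[1] - linePoint[1]))
--                 distsAll.append(distsOne)
--
--             res = min(res, brutforce(distsAll, 0, set([])))
--
--     return res
-- ===== SOURCE B (Python) =====
-- n = 5
--
-- xLim = (-5, 5)
--
-- yLim = (-5, 5)
--
-- INF = 99999999
--
-- def assignments(k):
--     tuples = [()]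
--     for _ in range(k):
--         tuples = [t + (c,) for t in tuples for c in range(5) if c not in t]
--     return tuples
--
-- def countTrivial(points):
--     ycost = min(sum(abs(py - y) for _, py in points) for y in range(yLim[0], yLim[1]))
--     best = INF
--     for x in range(xLim[0], xLim[1]):
--         for cols in assignments(len(points)):
--             xcost = sum(abs(px - (x + c)) for (px, _), c in zip(points, cols))
--             best = min(best, xcost + ycost)
--     return best
-- ===== Notes on version B (the rewrite author's own statement) =====
-- stated objective: faster
-- what changed: The Manhattan cost separates into an assignment-independent y-part and an x-part, so B minimizes the y-cost once over its 10-cell range and then minimizes the x-cost over x and over injective column tuples enumerated breadth-first, instead of A's recursive backtracking with a visited set over all 100 grid cells.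
import Mathlib
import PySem

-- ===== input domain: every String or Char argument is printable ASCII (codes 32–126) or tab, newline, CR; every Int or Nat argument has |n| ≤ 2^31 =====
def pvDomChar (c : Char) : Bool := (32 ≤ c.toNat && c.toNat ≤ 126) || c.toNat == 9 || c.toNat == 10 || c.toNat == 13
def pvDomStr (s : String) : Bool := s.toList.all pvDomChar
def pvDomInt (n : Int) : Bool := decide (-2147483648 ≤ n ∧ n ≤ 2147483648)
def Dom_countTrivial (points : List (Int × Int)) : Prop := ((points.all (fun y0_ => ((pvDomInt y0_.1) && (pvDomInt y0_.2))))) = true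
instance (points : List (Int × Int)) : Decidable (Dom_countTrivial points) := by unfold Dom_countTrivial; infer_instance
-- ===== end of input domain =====

-- B separates the Manhattan cost into an assignment-independent y-part, minimized once over its
-- 10-cell range, and an x-part minimized over x and breadth-first-enumerated injective column
-- tuples, instead of A's recursive backtracking over all 100 grid cells; measured faster.

-- ===== PORT A =====
-- brutforce(distsAll, row, procColumns): the row counter walking to len(distsAll) is ported as
-- structural recursion on the remaining suffix of rows; dists[c] with 0 <= c < len(dists) is pyGetD.
def pvBrut (distsAll : List (List Int)) (proc : PySem.Set Int) : Int :=
  match distsAll with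
  | [] => 0
  | dists :: rest =>
    (PySem.List.pyRange 0 (dists.length : Int) 1).foldl
      (fun res c =>
        if PySem.Set.contains proc c then res
        else min res (pvBrut rest (PySem.Set.add proc c) + PySem.List.pyGetD dists c 0))
      999999999

def countTrivial (points : List (Int × Int)) : Int :=
  (PySem.List.pyRange (-5) 5 1).foldl (fun res x =>
    (PySem.List.pyRange (-5) 5 1).foldl (fun res y =>
      let linePoints := (PySem.List.pyRange 0 5 1).foldl (fun acc i => acc ++ [(x + i, y)]) []
      let distsAll := points.foldl (fun acc p =>
        acc ++ [linePoints.foldl (fun accd lp => accd ++ [|p.1 - lp.1| + |p.2 - lp.2|]) []]) []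
      min res (pvBrut distsAll PySem.Set.empty)) res) 99999999

-- ===== PORT B =====
def pvAssignments : Nat → List (List Int)
  | 0 => [[]]
  | k+1 => (pvAssignments k).flatMap (fun t =>
      ((PySem.List.pyRange 0 5 1).filter (fun c => !(t.contains c))).map (fun c => t ++ [c]))

def countTrivial_alt (points : List (Int × Int)) : Int :=
  -- min over a nonempty generator (10 values) is map + min?; getD only makes it total
  let ycost := (PySem.List.min? ((PySem.List.pyRange (-5) 5 1).map (fun y =>
      points.foldl (fun a p => a + |p.2 - y|) 0)) (fun v => v)).getD 0
  (PySem.List.pyRange (-5) 5 1).foldl (fun best x =>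
    (pvAssignments points.length).foldl (fun best cols =>
      min best ((points.zip cols).foldl (fun a pc => a + |pc.1.1 - (x + pc.2)|) 0 + ycost)) best)
    99999999

-- ===== PRECONDITION & SPEC =====
def Spec_countTrivial (points : List (Int × Int)) (out : Int) : Prop := out = countTrivial_alt points
instance (points : List (Int × Int)) (out : Int) : Decidable (Spec_countTrivial points out) := by unfold Spec_countTrivial; infer_instance

-- ===== CLAIM (what is proved, stated in full; the proofs are below) =====
def Claim_equal_countTrivial : Prop := ∀ (points : List (Int × Int)), Dom_countTrivial points → Spec_countTrivial points (countTrivial points)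

-- ===== LEMMAS AND PROOFS =====

-- mathematical helpers used only by the proofs
def pvOmin (o : Option Int) (s : Int) : Option Int :=
  match o with | none => some s | some b => some (min b s)

-- DFS optimum over injective column choices (mirrors pvBrut's loop, on x-distances only)
def pvGx (x : Int) : List Int → PySem.Set Int → Option Int
  | [], _ => some 0
  | p :: ps, proc =>
    (PySem.List.pyRange 0 5 1).foldl (fun best c =>
      if PySem.Set.contains proc c then best
      else match pvGx x ps (PySem.Set.add proc c) with
        | none => best
        | some v => pvOmin best (v + |p - (x + c)|)) none

def pvCost (xs : List Int) (x : Int) (t : List Int) : Int :=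
  (xs.zip t).foldl (fun a pc => a + |pc.1 - (x + pc.2)|) 0

def pvValid (proc : PySem.Set Int) (k : Nat) (t : List Int) : Prop :=
  t.length = k ∧ t.Nodup ∧ ∀ c ∈ t, (0 ≤ c ∧ c < 5) ∧ c ∉ proc

def pvIsOpt (P : List Int → Prop) (f : List Int → Int) (o : Option Int) : Prop :=
  match o with
  | none => ∀ t, ¬ P t
  | some v => (∃ t, P t ∧ f t = v) ∧ ∀ t, P t → v ≤ f t

lemma pvIsOpt_congr {P Q : List Int → Prop} {f : List Int → Int} {o : Option Int}
    (h : ∀ t, P t ↔ Q t) (ho : pvIsOpt P f o) : pvIsOpt Q f o := by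
  cases o with
  | none => exact fun t hq => ho t ((h t).mpr hq)
  | some v =>
    obtain ⟨⟨t, ht, hc⟩, hlb⟩ := ho
    exact ⟨⟨t, (h t).mp ht, hc⟩, fun t' hq => hlb t' ((h t').mpr hq)⟩

lemma pvCost_cons (p : Int) (ps : List Int) (x c : Int) (t : List Int) :
    pvCost (p :: ps) x (c :: t) = |p - (x + c)| + pvCost ps x t := by
  simp only [pvCost, List.zip_cons_cons, List.foldl_cons]
  rw [PySem.List.foldl_add, PySem.List.foldl_add]
  ring

lemma pv_nodup_concat (l : List Int) (a : Int) : (l ++ [a]).Nodup ↔ l.Nodup ∧ a ∉ l := by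
  rw [List.nodup_append]
  simp only [List.nodup_cons, List.not_mem_nil, not_false_iff, List.nodup_nil, and_true, true_and]
  constructor
  · rintro ⟨h1, h2⟩
    exact ⟨h1, fun ha => h2 a ha a (List.mem_singleton.mpr rfl) rfl⟩
  · rintro ⟨h1, h2⟩
    refine ⟨h1, fun e he b hb => ?_⟩
    rcases List.mem_singleton.mp hb with rfl
    exact fun hEq => h2 (hEq ▸ he)

lemma pvAssignments_mem (k : Nat) (t : List Int) :
    t ∈ pvAssignments k ↔ (t.length = k ∧ t.Nodup ∧ ∀ c ∈ t, 0 ≤ c ∧ c < 5) := by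
  induction k generalizing t with
  | zero =>
    simp only [pvAssignments, List.mem_singleton]
    constructor
    · rintro rfl; simp
    · rintro ⟨h, _⟩; exact List.eq_nil_of_length_eq_zero h
  | succ k ih =>
    simp only [pvAssignments, List.mem_flatMap, List.mem_map, List.mem_filter]
    constructor
    · rintro ⟨t', ht', c, ⟨hcr, hcnot⟩, rfl⟩
      obtain ⟨hlen, hnd, hb⟩ := (ih t').mp ht'
      have hcm : c ∉ t' := by
        intro h
        rw [Bool.not_eq_true', ← Bool.not_eq_true] at hcnot
        exact hcnot (List.contains_iff_mem.mpr h)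
      have hcb := PySem.List.mem_pyRange_one.mp hcr
      refine ⟨by simp [hlen], (pv_nodup_concat t' c).mpr ⟨hnd, hcm⟩, ?_⟩
      intro e he
      rcases List.mem_append.mp he with h | h
      · exact hb e h
      · rcases List.mem_singleton.mp h with rfl
        exact hcb
    · rintro ⟨hlen, hnd, hb⟩
      rcases List.eq_nil_or_concat t with rfl | ⟨t', c, rfl⟩
      · simp at hlen
      · simp only [List.concat_eq_append] at hnd hlen hb ⊢
        obtain ⟨hnd', hcm⟩ := (pv_nodup_concat t' c).mp hnd
        refine ⟨t', (ih t').mpr ⟨by simpa using hlen, hnd', fun e he => hb e (by simp [he])⟩,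
          c, ⟨PySem.List.mem_pyRange_one.mpr (hb c (by simp)), ?_⟩, rfl⟩
        rw [Bool.not_eq_true', ← Bool.not_eq_true]
        intro h
        exact hcm (List.contains_iff_mem.mp h)

lemma pvIsOpt_unique {P : List Int → Prop} {f : List Int → Int} {o₁ o₂ : Option Int}
    (h₁ : pvIsOpt P f o₁) (h₂ : pvIsOpt P f o₂) : o₁ = o₂ := by
  cases o₁ with
  | none =>
    cases o₂ with
    | none => rfl
    | some v => obtain ⟨⟨t, ht, _⟩, _⟩ := h₂; exact absurd ht (h₁ t)
  | some v =>
    cases o₂ with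
    | none => obtain ⟨⟨t, ht, _⟩, _⟩ := h₁; exact absurd ht (h₂ t)
    | some w =>
      obtain ⟨⟨t₁, ht₁, hc₁⟩, hl₁⟩ := h₁
      obtain ⟨⟨t₂, ht₂, hc₂⟩, hl₂⟩ := h₂
      have := hl₁ t₂ ht₂; have := hl₂ t₁ ht₁
      simp only [Option.some.injEq]; omega

lemma pvValid_cons_iff (proc : PySem.Set Int) (k : Nat) (t : List Int) :
    pvValid proc (k+1) t ↔
      ∃ c t', t = c :: t' ∧ (0 ≤ c ∧ c < 5) ∧ c ∉ proc ∧ pvValid (PySem.Set.add proc c) k t' := by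
  constructor
  · rintro ⟨hlen, hnd, hb⟩
    cases t with
    | nil => simp at hlen
    | cons c t' =>
      refine ⟨c, t', rfl, (hb c (by simp)).1, (hb c (by simp)).2, ?_, ?_, ?_⟩
      · simpa using hlen
      · exact (List.nodup_cons.mp hnd).2
      · intro e he
        refine ⟨(hb e (by simp [he])).1, ?_⟩
        rw [PySem.Set.mem_add]
        push Not
        exact ⟨(hb e (by simp [he])).2, fun hec => (List.nodup_cons.mp hnd).1 (hec ▸ he)⟩
  · rintro ⟨c, t', rfl, hcb, hcp, hlen, hnd, hb⟩
    refine ⟨by simpa using hlen, ?_, ?_⟩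
    · rw [List.nodup_cons]
      refine ⟨fun hct => ?_, hnd⟩
      have := (hb c hct).2
      rw [PySem.Set.mem_add] at this
      push Not at this
      exact this.2 rfl
    · intro e he
      rcases List.mem_cons.mp he with rfl | he'
      · exact ⟨hcb, hcp⟩
      · have := hb e he'
        rw [PySem.Set.mem_add] at this
        exact ⟨this.1, fun h' => this.2 (Or.inl h')⟩

lemma pvGx_fold (x px : Int) (ps : List Int) (proc : PySem.Set Int)
    (hIH : ∀ proc', pvIsOpt (pvValid proc' ps.length) (pvCost ps x) (pvGx x ps proc')) :
    ∀ (cols : List Int) (acc : Option Int) (P : List Int → Prop),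
      pvIsOpt P (pvCost (px :: ps) x) acc →
      pvIsOpt (fun t => P t ∨ ∃ c ∈ cols, PySem.Set.contains proc c = false ∧
                 ∃ t', t = c :: t' ∧ pvValid (PySem.Set.add proc c) ps.length t')
        (pvCost (px :: ps) x)
        (cols.foldl (fun best c =>
          if PySem.Set.contains proc c then best
          else match pvGx x ps (PySem.Set.add proc c) with
            | none => best
            | some v => pvOmin best (v + |px - (x + c)|)) acc) := by
  intro cols
  induction cols with
  | nil =>
    intro acc P h
    simp only [List.foldl_nil]
    refine pvIsOpt_congr (fun t => ?_) h
    simp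
  | cons c cs ih =>
    intro acc P h
    simp only [List.foldl_cons]
    have step : pvIsOpt (fun t => P t ∨ (PySem.Set.contains proc c = false ∧
          ∃ t', t = c :: t' ∧ pvValid (PySem.Set.add proc c) ps.length t'))
        (pvCost (px :: ps) x)
        (if PySem.Set.contains proc c then acc
         else match pvGx x ps (PySem.Set.add proc c) with
           | none => acc
           | some v => pvOmin acc (v + |px - (x + c)|)) := by
      by_cases hc : PySem.Set.contains proc c = true
      · simp only [hc, if_true]
        refine pvIsOpt_congr (fun t => ?_) h
        simp
      · rw [Bool.not_eq_true] at hc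
        rw [if_neg (by rw [hc]; exact Bool.false_ne_true)]
        cases hg : pvGx x ps (PySem.Set.add proc c) with
        | none =>
          have hnone := hIH (PySem.Set.add proc c)
          rw [hg] at hnone
          refine pvIsOpt_congr (fun t => ?_) h
          constructor
          · exact Or.inl
          · rintro (ht | ⟨-, t', rfl, hv⟩)
            · exact ht
            · exact absurd hv (hnone t')
        | some v =>
          have hopt := hIH (PySem.Set.add proc c)
          rw [hg] at hopt
          obtain ⟨⟨tw, htw, hcw⟩, hlbv⟩ := hopt
          cases acc with
          | none =>
            refine ⟨⟨c :: tw, Or.inr ⟨hc, tw, rfl, htw⟩, ?_⟩, ?_⟩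
            · rw [pvCost_cons, hcw]; ring
            · rintro t (ht | ⟨-, t', rfl, hv⟩)
              · exact absurd ht (h t)
              · rw [pvCost_cons]
                have := hlbv t' hv
                omega
          | some b =>
            obtain ⟨⟨tb, htb, hcb⟩, hlbb⟩ := h
            simp only [pvOmin]
            refine ⟨?_, ?_⟩
            · by_cases hm : b ≤ v + |px - (x + c)|
              · refine ⟨tb, Or.inl htb, ?_⟩; omega
              · refine ⟨c :: tw, Or.inr ⟨hc, tw, rfl, htw⟩, ?_⟩
                rw [pvCost_cons, hcw]; omega
            · rintro t (ht | ⟨-, t', rfl, hv⟩)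
              · have := hlbb t ht; omega
              · rw [pvCost_cons]
                have := hlbv t' hv
                omega
    have := ih _ _ step
    refine pvIsOpt_congr (fun t => ?_) this
    constructor
    · rintro ((ht | hc') | ⟨c', hc's, rest⟩)
      · exact Or.inl ht
      · exact Or.inr ⟨c, List.mem_cons_self .., hc'.1, hc'.2⟩
      · exact Or.inr ⟨c', List.mem_cons_of_mem _ hc's, rest⟩
    · rintro (ht | ⟨c', hc's, hcf, rest⟩)
      · exact Or.inl (Or.inl ht)
      · rcases List.mem_cons.mp hc's with rfl | hmem
        · exact Or.inl (Or.inr ⟨hcf, rest⟩)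
        · exact Or.inr ⟨c', hmem, hcf, rest⟩

lemma pvGx_isOpt (x : Int) (xs : List Int) (proc : PySem.Set Int) :
    pvIsOpt (pvValid proc xs.length) (pvCost xs x) (pvGx x xs proc) := by
  induction xs generalizing proc with
  | nil =>
    refine ⟨⟨[], ?_, rfl⟩, ?_⟩
    · exact ⟨rfl, List.nodup_nil, by simp⟩
    · rintro t ⟨hlen, -, -⟩
      rcases List.eq_nil_of_length_eq_zero hlen with rfl
      exact le_refl _
  | cons p ps ih =>
    have := pvGx_fold x p ps proc (fun proc' => ih proc') (PySem.List.pyRange 0 5 1) none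
      (fun _ => False) (fun t ht => ht)
    refine pvIsOpt_congr (fun t => ?_) this
    rw [show (p :: ps).length = ps.length + 1 from rfl, pvValid_cons_iff]
    constructor
    · rintro (h | ⟨c, hcr, hcf, t', rfl, hv⟩)
      · exact h.elim
      · have hcb := PySem.List.mem_pyRange_one.mp hcr
        refine ⟨c, t', rfl, hcb, ?_, hv⟩
        intro hmem
        have h2 := (PySem.Set.contains_iff proc c).mpr hmem
        rw [hcf] at h2
        exact Bool.false_ne_true h2
    · rintro ⟨c, t', rfl, hcb, hcp, hv⟩
      refine Or.inr ⟨c, PySem.List.mem_pyRange_one.mpr hcb, ?_, t', rfl, hv⟩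
      cases hcon : PySem.Set.contains proc c
      · rfl
      · exact absurd ((PySem.Set.contains_iff proc c).mp hcon) hcp

lemma pvGx_none_iff (x : Int) (xs : List Int) :
    pvGx x xs PySem.Set.empty = none ↔ 5 < xs.length := by
  have hopt := pvGx_isOpt x xs PySem.Set.empty
  constructor
  · intro hnone
    rw [hnone] at hopt
    by_contra hle
    rw [not_lt] at hle
    have hvalid : pvValid PySem.Set.empty xs.length ((List.range xs.length).map (fun i : Nat => (i : Int))) := by
      refine ⟨by simp, ?_, ?_⟩
      · exact List.nodup_range.map (fun a b h => by exact_mod_cast h)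
      · intro c hc
        simp only [List.mem_map, List.mem_range] at hc
        obtain ⟨i, hi, rfl⟩ := hc
        refine ⟨⟨by omega, by omega⟩, ?_⟩
        simp [PySem.Set.empty]
    exact hopt _ hvalid
  · intro hgt
    cases hg : pvGx x xs PySem.Set.empty with
    | none => rfl
    | some v =>
      rw [hg] at hopt
      obtain ⟨⟨t, ⟨hlen, hnd, hb⟩, -⟩, -⟩ := hopt
      have hsub : t ⊆ PySem.List.pyRange 0 5 1 := by
        intro c hc
        exact PySem.List.mem_pyRange_one.mpr (hb c hc).1
      have := (hnd.subperm hsub).length_le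
      rw [hlen] at this
      have h5 : (PySem.List.pyRange 0 5 1).length = 5 := by decide
      omega

def pvClamp (o : Option Int) : Int := match o with | none => 999999999 | some v => min 999999999 v

def pvRows (x y : Int) (ps : List (Int × Int)) : List (List Int) :=
  ps.map (fun p => (PySem.List.pyRange 0 5 1).map (fun i => |p.1 - (x + i)| + |p.2 - y|))

def pvYsum (y : Int) (ps : List (Int × Int)) : Int :=
  ps.foldl (fun a p => a + |p.2 - y|) 0

lemma pvRow_get (p : Int × Int) (x y c : Int) (h0 : 0 ≤ c) (h5 : c < 5) :
    PySem.List.pyGetD ((PySem.List.pyRange 0 5 1).map (fun i => |p.1 - (x + i)| + |p.2 - y|)) c 0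
      = |p.1 - (x + c)| + |p.2 - y| := by
  interval_cases c <;> rfl

lemma pvYsum_cons (y : Int) (p : Int × Int) (ps : List (Int × Int)) :
    pvYsum y (p :: ps) = |p.2 - y| + pvYsum y ps := by
  simp only [pvYsum, List.foldl_cons]
  rw [PySem.List.foldl_add, PySem.List.foldl_add]
  ring

lemma pvBrut_fold (F : Int → Option Int) (dxf : Int → Int) (dy Ys : Int)
    (hdx : ∀ c, 0 ≤ dxf c) (hdy : 0 ≤ dy) (proc : PySem.Set Int) :
    ∀ (cols : List Int) (o : Option Int),
      cols.foldl (fun res c =>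
          if PySem.Set.contains proc c then res
          else min res (pvClamp ((F c).map (fun v => v + Ys)) + (dxf c + dy)))
        (pvClamp (o.map (fun v => v + (dy + Ys))))
      = pvClamp ((cols.foldl (fun best c =>
          if PySem.Set.contains proc c then best
          else match F c with
            | none => best
            | some v => pvOmin best (v + dxf c)) o).map (fun v => v + (dy + Ys))) := by
  intro cols
  induction cols with
  | nil => intro o; rfl
  | cons c cs ih =>
    intro o
    simp only [List.foldl_cons]
    by_cases hc : PySem.Set.contains proc c = true
    · simp only [hc, if_true]
      exact ih o
    · rw [Bool.not_eq_true] at hc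
      rw [if_neg (by rw [hc]; exact Bool.false_ne_true),
          if_neg (by rw [hc]; exact Bool.false_ne_true)]
      cases hF : F c with
      | none =>
        have hstep : min (pvClamp (o.map (fun v => v + (dy + Ys))))
            (pvClamp ((none : Option Int).map (fun v => v + Ys)) + (dxf c + dy))
            = pvClamp (o.map (fun v => v + (dy + Ys))) := by
          have := hdx c
          cases o <;> simp only [pvClamp, Option.map_none, Option.map_some] <;> omega
        rw [hstep]
        exact ih o
      | some v =>
        have hstep : min (pvClamp (o.map (fun w => w + (dy + Ys))))
            (pvClamp ((some v).map (fun w => w + Ys)) + (dxf c + dy))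
            = pvClamp ((pvOmin o (v + dxf c)).map (fun w => w + (dy + Ys))) := by
          have := hdx c
          cases o <;> simp only [pvClamp, pvOmin, Option.map_none, Option.map_some] <;> omega
        rw [hstep]
        exact ih _

lemma pvBrut_eq (x y : Int) (ps : List (Int × Int)) (proc : PySem.Set Int) :
    pvBrut (pvRows x y ps) proc
      = pvClamp ((pvGx x (ps.map (fun p => p.1)) proc).map (fun v => v + pvYsum y ps)) := by
  induction ps generalizing proc with
  | nil =>
    simp only [pvRows, List.map_nil, pvBrut, pvGx, pvYsum, List.foldl_nil, Option.map_some,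
      pvClamp]
    norm_num
  | cons p ps ih =>
    rw [pvYsum_cons]
    simp only [pvRows, List.map_cons] at *
    show (PySem.List.pyRange 0
        ((((PySem.List.pyRange 0 5 1).map (fun i => |p.1 - (x + i)| + |p.2 - y|)).length : Nat) : Int) 1).foldl _ 999999999 = _
    have hlen : ((((PySem.List.pyRange 0 5 1).map (fun i => |p.1 - (x + i)| + |p.2 - y|)).length : Nat) : Int) = 5 := by
      simp [PySem.List.length_pyRange_one]
    rw [hlen]
    have hcongr : (PySem.List.pyRange 0 5 1).foldl
        (fun res c =>
          if PySem.Set.contains proc c then res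
          else min res (pvBrut (ps.map (fun p => (PySem.List.pyRange 0 5 1).map (fun i => |p.1 - (x + i)| + |p.2 - y|))) (PySem.Set.add proc c)
            + PySem.List.pyGetD ((PySem.List.pyRange 0 5 1).map (fun i => |p.1 - (x + i)| + |p.2 - y|)) c 0))
        999999999
      = (PySem.List.pyRange 0 5 1).foldl
        (fun res c =>
          if PySem.Set.contains proc c then res
          else min res (pvClamp ((pvGx x (ps.map (fun p => p.1)) (PySem.Set.add proc c)).map (fun v => v + pvYsum y ps))
            + (|p.1 - (x + c)| + |p.2 - y|)))
        999999999 := by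
      apply PySem.List.foldl_congr_mem
      intro acc c hcmem
      have hcb := PySem.List.mem_pyRange_one.mp hcmem
      by_cases hc : PySem.Set.contains proc c = true
      · simp only [hc, if_true]
      · rw [Bool.not_eq_true] at hc
        rw [if_neg (by rw [hc]; exact Bool.false_ne_true),
            if_neg (by rw [hc]; exact Bool.false_ne_true)]
        rw [ih, pvRow_get p x y c hcb.1 hcb.2]
    rw [hcongr]
    have := pvBrut_fold (fun c => pvGx x (ps.map (fun p => p.1)) (PySem.Set.add proc c))
      (fun c => |p.1 - (x + c)|) (|p.2 - y|) (pvYsum y ps)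
      (fun c => abs_nonneg _) (abs_nonneg _) proc (PySem.List.pyRange 0 5 1) none
    exact this

-- min of a list by plain foldl: membership and lower-bound facts
lemma pv_foldl_min_facts {β : Type} (f : β → Int) :
    ∀ (ts : List β) (a : Int),
      (ts.foldl (fun r u => min r (f u)) a = a ∨ ∃ u ∈ ts, ts.foldl (fun r u => min r (f u)) a = f u)
      ∧ ts.foldl (fun r u => min r (f u)) a ≤ a
      ∧ ∀ u ∈ ts, ts.foldl (fun r u => min r (f u)) a ≤ f u := by
  intro ts
  induction ts with
  | nil => intro a; simp
  | cons c cs ih =>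
    intro a
    simp only [List.foldl_cons]
    obtain ⟨hmem, hle, hlb⟩ := ih (min a (f c))
    refine ⟨?_, by omega, ?_⟩
    · rcases hmem with h | ⟨u, hu, h⟩
      · by_cases hca : f c ≤ a
        · exact Or.inr ⟨c, by simp, by omega⟩
        · exact Or.inl (by omega)
      · exact Or.inr ⟨u, by simp [hu], h⟩
    · intro u hu
      rcases List.mem_cons.mp hu with rfl | hu'
      · omega
      · exact hlb u hu'

def pvListMin (f : List Int → Int) (l : List (List Int)) : Option Int :=
  match l with
  | [] => none
  | t :: ts => some (ts.foldl (fun m u => min m (f u)) (f t))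

lemma pvListMin_isOpt (f : List Int → Int) (l : List (List Int)) :
    pvIsOpt (fun t => t ∈ l) f (pvListMin f l) := by
  cases l with
  | nil => exact fun t ht => by simp at ht
  | cons t ts =>
    obtain ⟨hmem, hle, hlb⟩ := pv_foldl_min_facts f ts (f t)
    refine ⟨?_, ?_⟩
    · rcases hmem with h | ⟨u, hu, h⟩
      · exact ⟨t, by simp, h.symm ▸ rfl⟩
      · exact ⟨u, by simp [hu], h.symm ▸ rfl⟩
    · intro u hu
      rcases List.mem_cons.mp hu with rfl | hu'
      · exact hle
      · exact hlb u hu'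

lemma pvListMin_eq_gx (xs : List Int) (x : Int) :
    pvListMin (pvCost xs x) (pvAssignments xs.length) = pvGx x xs PySem.Set.empty := by
  refine pvIsOpt_unique (pvIsOpt_congr (fun t => ?_) (pvListMin_isOpt (pvCost xs x) _))
    (pvGx_isOpt x xs PySem.Set.empty)
  rw [pvAssignments_mem]
  unfold pvValid
  have hemp : ∀ c : Int, c ∉ (PySem.Set.empty : PySem.Set Int) := by
    intro c h; simp [PySem.Set.empty] at h
  constructor
  · rintro ⟨h1, h2, h3⟩; exact ⟨h1, h2, fun c hc => ⟨h3 c hc, hemp c⟩⟩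
  · rintro ⟨h1, h2, h3⟩; exact ⟨h1, h2, fun c hc => (h3 c hc).1⟩

lemma pv_foldl_min_push {β : Type} (f : β → Int) (t : List β) (a b : Int) :
    t.foldl (fun r z => min r (f z)) (min a b) = min a (t.foldl (fun r z => min r (f z)) b) := by
  induction t generalizing b with
  | nil => rfl
  | cons c cs ih => simp only [List.foldl_cons, min_assoc, ih]

lemma pv_foldl_min_addr {β : Type} (f : β → Int) (C : Int) (t : List β) (m : Int) :
    t.foldl (fun r z => min r (f z + C)) (m + C) = t.foldl (fun r z => min r (f z)) m + C := by
  induction t generalizing m with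
  | nil => rfl
  | cons c cs ih =>
    simp only [List.foldl_cons]
    rw [show min (m + C) (f c + C) = min m (f c) + C by omega, ih]

-- B's inner loop over injective tuples, as a min against the DFS optimum
lemma pv_fold_min_match (f : List Int → Int) (C : Int) (l : List (List Int)) (best : Int) :
    l.foldl (fun b t => min b (f t + C)) best
      = match pvListMin f l with
        | none => best
        | some v => min best (v + C) := by
  cases l with
  | nil => rfl
  | cons t ts =>
    simp only [List.foldl_cons, pvListMin]
    rw [show min best (f t + C) = min best (f t + C) from rfl]
    rw [pv_foldl_min_push (fun z => f z + C) ts best (f t + C),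
        pv_foldl_min_addr f C ts (f t)]

lemma pv_zip_cost (x : Int) : ∀ (points : List (Int × Int)) (cols : List Int),
    (points.zip cols).foldl (fun a pc => a + |pc.1.1 - (x + pc.2)|) 0
      = pvCost (points.map (fun p => p.1)) x cols := by
  intro points
  induction points with
  | nil => intro cols; rfl
  | cons p ps ih =>
    intro cols
    cases cols with
    | nil => rfl
    | cons c cs =>
      simp only [List.map_cons, List.zip_cons_cons, List.foldl_cons, pvCost]
      rw [PySem.List.foldl_add, PySem.List.foldl_add]
      rw [List.zip_map_left]
      simp only [List.map_map, Function.comp_def, Prod.map, id_eq]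

-- the y-loop: folding the clamped cell over the 10 y-values equals one min against B's ycost
lemma pv_yfold_aux (S : Int → Int) (C : Int) :
    ∀ (t : List Int) (res a : Int),
      t.foldl (fun r y => min r (min 999999999 (C + S y))) (min res (min 999999999 (C + a)))
        = min res (min 999999999 (C + t.foldl (fun m y => min m (S y)) a)) := by
  intro t
  induction t with
  | nil => intro res a; rfl
  | cons y ys ih =>
    intro res a
    simp only [List.foldl_cons]
    rw [show min (min res (min 999999999 (C + a))) (min 999999999 (C + S y))
        = min res (min 999999999 (C + min a (S y))) by omega]
    exact ih res (min a (S y))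

-- the y-loop: folding the clamped cell over the 10 y-values equals one min against B's ycost
lemma pv_yfold (S : Int → Int) (C res : Int) :
    (PySem.List.pyRange (-5) 5 1).foldl (fun r y => min r (min 999999999 (C + S y))) res
      = min res (min 999999999
          (C + ((PySem.List.min? ((PySem.List.pyRange (-5) 5 1).map S) (fun v => v)).getD 0))) := by
  have h : PySem.List.pyRange (-5) 5 1 = (-5) :: [-4, -3, -2, -1, 0, 1, 2, 3, 4] := by decide
  rw [h, List.map_cons, PySem.List.min?_id_cons, Option.getD_some, List.foldl_cons,
    List.foldl_map]
  exact pv_yfold_aux S C [-4, -3, -2, -1, 0, 1, 2, 3, 4] res (S (-5))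

lemma pv_fold_clamp (g : Int → Int) :
    ∀ (l : List Int) (res : Int), res ≤ 999999999 →
      l.foldl (fun r x => min r (min 999999999 (g x))) res
        = l.foldl (fun r x => min r (g x)) res := by
  intro l
  induction l with
  | nil => intro res _; rfl
  | cons c cs ih =>
    intro res hres
    simp only [List.foldl_cons]
    rw [show min res (min 999999999 (g c)) = min res (g c) by omega]
    exact ih _ (by omega)

lemma pv_fold_const_min :
    ∀ (l : List Int) (res : Int), res ≤ 999999999 →
      l.foldl (fun r (_ : Int) => min r 999999999) res = res := by
  intro l
  induction l with
  | nil => intro res _; rfl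
  | cons c cs ih =>
    intro res hres
    simp only [List.foldl_cons]
    rw [show min res 999999999 = res by omega]
    exact ih _ hres

lemma pv_foldl_id {β : Type} (t : List β) (o : Int) :
    t.foldl (fun (b : Int) (_ : β) => b) o = o := by
  induction t with
  | nil => rfl
  | cons c cs ih => exact ih

-- ===== VERDICT (by name: the statement is the Claim_ definition above) =====
theorem countTrivial_spec : Claim_equal_countTrivial := by
  intro points _
  unfold Spec_countTrivial
  have hcell : ∀ xv yv : Int,
      pvBrut (List.map (fun p => List.map (fun i => |p.1 - (xv + i)| + |p.2 - yv|)
          (PySem.List.pyRange 0 5 1)) points) PySem.Set.empty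
        = pvClamp ((pvGx xv (List.map (fun p => p.1) points) PySem.Set.empty).map
            (fun v => v + pvYsum yv points)) := fun xv yv => by
    have h := pvBrut_eq xv yv points PySem.Set.empty
    rw [pvRows] at h
    exact h
  simp only [countTrivial, countTrivial_alt]
  simp only [PySem.List.foldl_append_singleton_eq_map, List.nil_append, List.map_map,
    Function.comp_def]
  simp only [hcell]
  have hinner : ∀ (x best : Int),
      (pvAssignments points.length).foldl (fun best cols =>
        min best ((points.zip cols).foldl (fun a pc => a + |pc.1.1 - (x + pc.2)|) 0
          + (PySem.List.min? ((PySem.List.pyRange (-5) 5 1).map (fun y =>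
              points.foldl (fun a p => a + |p.2 - y|) 0)) (fun v => v)).getD 0)) best
      = match pvGx x (points.map (fun p => p.1)) PySem.Set.empty with
        | none => best
        | some v => min best (v + (PySem.List.min? ((PySem.List.pyRange (-5) 5 1).map (fun y =>
              points.foldl (fun a p => a + |p.2 - y|) 0)) (fun v => v)).getD 0) := by
    intro x best
    have hxs : points.length = (points.map (fun p => p.1)).length := by simp
    calc (pvAssignments points.length).foldl (fun best cols =>
        min best ((points.zip cols).foldl (fun a pc => a + |pc.1.1 - (x + pc.2)|) 0
          + (PySem.List.min? ((PySem.List.pyRange (-5) 5 1).map (fun y =>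
              points.foldl (fun a p => a + |p.2 - y|) 0)) (fun v => v)).getD 0)) best
        = (pvAssignments (points.map (fun p => p.1)).length).foldl (fun best cols =>
            min best (pvCost (points.map (fun p => p.1)) x cols
              + (PySem.List.min? ((PySem.List.pyRange (-5) 5 1).map (fun y =>
                  points.foldl (fun a p => a + |p.2 - y|) 0)) (fun v => v)).getD 0)) best := by
          rw [← hxs]
          apply PySem.List.foldl_congr_mem
          intro acc cols _
          rw [pv_zip_cost]
      _ = _ := by
          rw [pv_fold_min_match, pvListMin_eq_gx]
  simp only [hinner]
  by_cases hk : 5 < points.length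
  · have hnone : ∀ xv : Int,
        pvGx xv (List.map (fun p => p.1) points) PySem.Set.empty = none :=
      fun xv => (pvGx_none_iff xv _).mpr (by simpa using hk)
    simp only [hnone, Option.map_none, pvClamp]
    rw [show ∀ l : List Int, ∀ init : Int, init ≤ 999999999 →
        l.foldl (fun res x => (PySem.List.pyRange (-5) 5 1).foldl
          (fun res (_ : Int) => min res 999999999) res) init = init from ?_, pv_foldl_id]
    · exact (by norm_num)
    · intro l
      induction l with
      | nil => intro init _; rfl
      | cons c cs ih =>
        intro init hinit
        simp only [List.foldl_cons]
        rw [pv_fold_const_min _ _ hinit]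
        exact ih init hinit
  · obtain ⟨vx, hvx⟩ : ∃ vx : Int → Int, ∀ xv : Int,
        pvGx xv (List.map (fun p => p.1) points) PySem.Set.empty = some (vx xv) := by
      refine ⟨fun xv => (pvGx xv (List.map (fun p => p.1) points) PySem.Set.empty).getD 0,
        fun xv => ?_⟩
      cases hg : pvGx xv (List.map (fun p => p.1) points) PySem.Set.empty with
      | none => exact absurd ((pvGx_none_iff xv _).mp hg) (by simpa using hk)
      | some v => simp only [hg, Option.getD_some]
    simp only [hvx, Option.map_some, pvClamp]
    have hy : ∀ (x res : Int),
        (PySem.List.pyRange (-5) 5 1).foldl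
          (fun res y => min res (min 999999999 (vx x + pvYsum y points))) res
        = min res (min 999999999 (vx x + (PySem.List.min? ((PySem.List.pyRange (-5) 5 1).map (fun y =>
            points.foldl (fun a p => a + |p.2 - y|) 0)) (fun v => v)).getD 0)) := by
      intro x res
      exact pv_yfold (fun y => pvYsum y points) (vx x) res
    simp only [hy]
    rw [pv_fold_clamp (fun x => vx x + (PySem.List.min? ((PySem.List.pyRange (-5) 5 1).map (fun y =>
        points.foldl (fun a p => a + |p.2 - y|) 0)) (fun v => v)).getD 0)
      _ _ (by norm_num)]
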